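-- pv_equiv track=rewrite | github.com/li1fang/AiUE | tools/t1/python/aiue_t1/evidence_pack.py | _q5c_highest_risk_band
-- ===== SOURCE A (Python) =====
-- Q5C_RISK_BAND_ORDER = {
--     "fail": 0,
--     "borderline": 1,
--     "watch": 2,
--     "stable": 3,
-- }
--
-- def _q5c_highest_risk_band(package_summaries: list[dict]) -> str:
--     if not package_summaries:
--         return "missing"
--     highest = min(
--         (str(item.get("risk_band") or "stable") for item in package_summaries),
--         key=lambda band: int(Q5C_RISK_BAND_ORDER.get(band, 999)),
--     )
--     return highest
-- ===== SOURCE B (Python) =====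
-- def _q5c_highest_risk_band(package_summaries: list[dict]) -> str:
--     if not package_summaries:
--         return "missing"
--     bands = [str(item.get("risk_band") or "stable") for item in package_summaries]
--     for band in ("fail", "borderline", "watch", "stable"):
--         if band in bands:
--             return band
--     return bands[0]
-- ===== Notes on version B (the rewrite author's own statement) =====
-- stated objective: simpler
-- what changed: Replaces min-by-numeric-key over the order dict with an early-exit membership scan of the four bands in precedence order, falling back to the first package's band when no known band occurs.
import Mathlib
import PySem

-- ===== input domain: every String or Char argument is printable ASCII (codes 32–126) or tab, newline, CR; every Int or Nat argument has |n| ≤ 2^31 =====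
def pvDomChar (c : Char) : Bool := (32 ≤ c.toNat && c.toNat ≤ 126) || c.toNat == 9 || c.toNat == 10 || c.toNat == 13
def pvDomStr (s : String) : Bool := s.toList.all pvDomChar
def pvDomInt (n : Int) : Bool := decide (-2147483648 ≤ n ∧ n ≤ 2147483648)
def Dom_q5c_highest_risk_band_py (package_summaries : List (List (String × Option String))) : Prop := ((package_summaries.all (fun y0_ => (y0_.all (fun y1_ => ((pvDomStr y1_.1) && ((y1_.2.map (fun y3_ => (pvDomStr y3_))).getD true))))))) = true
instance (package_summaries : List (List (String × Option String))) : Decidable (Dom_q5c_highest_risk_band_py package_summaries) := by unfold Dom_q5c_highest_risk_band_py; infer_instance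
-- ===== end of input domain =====

-- B replaces min-by-numeric-key over the order dict with an early-exit precedence membership scan; objective: simpler.


-- shared helper: str(item.get("risk_band") or "stable")  (first-match lookup; None or "" falls back to "stable")
def q5cNorm (item : List (String × Option String)) : String :=
  match item.find? (fun p => p.1 == "risk_band") with
  | none => "stable"
  | some (_, none) => "stable"
  | some (_, some s) => if s = "" then "stable" else s

-- ===== PORT A =====
def q5cOrderDict : PySem.Dict String Int :=
  PySem.Dict.ofList [("fail", 0), ("borderline", 1), ("watch", 2), ("stable", 3)]

def q5cKey (band : String) : Int := q5cOrderDict.getD band 999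

def q5c_highest_risk_band_py (package_summaries : List (List (String × Option String))) : String :=
  if package_summaries = [] then "missing"
  else
    match PySem.List.min? (package_summaries.map q5cNorm) q5cKey with
    | some m => m
    | none => ""  -- unreachable: the generator is nonempty here

-- ===== PORT B =====
def q5cScan (precs : List String) (bands : List String) (first : String) : String :=
  match precs with
  | [] => first
  | p :: rest => if bands.contains p then p else q5cScan rest bands first

def q5c_highest_risk_band_py_alt (package_summaries : List (List (String × Option String))) : String :=
  match package_summaries.map q5cNorm with
  | [] => "missing"
  | b :: bs => q5cScan ["fail", "borderline", "watch", "stable"] (b :: bs) b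

-- ===== PRECONDITION & SPEC =====
def Spec_q5c_highest_risk_band_py (package_summaries : List (List (String × Option String))) (out : String) : Prop := out = q5c_highest_risk_band_py_alt package_summaries
instance (package_summaries : List (List (String × Option String))) (out : String) : Decidable (Spec_q5c_highest_risk_band_py package_summaries out) := by unfold Spec_q5c_highest_risk_band_py; infer_instance

-- ===== CLAIM (what is proved, stated in full; the proofs are below) =====
def Claim_equal_q5c_highest_risk_band_py : Prop := ∀ (package_summaries : List (List (String × Option String))), Dom_q5c_highest_risk_band_py package_summaries → Spec_q5c_highest_risk_band_py package_summaries (q5c_highest_risk_band_py package_summaries)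

-- ===== LEMMAS AND PROOFS =====

theorem q5cDict_eq : q5cOrderDict = PySem.Dict.mk [("fail", 0), ("borderline", 1), ("watch", 2), ("stable", 3)] := by decide

theorem q5cKey_eq (s : String) :
    q5cKey s = if s = "fail" then 0 else if s = "borderline" then 1
      else if s = "watch" then 2 else if s = "stable" then 3 else 999 := by
  by_cases h1 : s = "fail"
  · subst h1; decide
  by_cases h2 : s = "borderline"
  · subst h2; decide
  by_cases h3 : s = "watch"
  · subst h3; decide
  by_cases h4 : s = "stable"
  · subst h4; decide
  rw [if_neg h1, if_neg h2, if_neg h3, if_neg h4]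
  simp only [q5cKey, q5cDict_eq, PySem.Dict.getD, PySem.Dict.get?_mk_cons, beq_iff_eq]
  rw [if_neg (Ne.symm h1), if_neg (Ne.symm h2), if_neg (Ne.symm h3), if_neg (Ne.symm h4)]
  rfl

theorem min?_cons_head {α : Type} (k : α → Int) (b : α) (bs : List α)
    (h : ∀ x ∈ bs, ¬ k x < k b) : PySem.List.min? (b :: bs) k = some b := by
  have : ∀ t : List α, (∀ x ∈ t, ¬ k x < k b) →
      List.foldl (fun acc x =>
        match acc with
        | none => some x
        | some m => if k x < k m then some x else some m) (some b) t = some b := by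
    intro t
    induction t with
    | nil => intro _; rfl
    | cons x t ih =>
      intro hx
      have hxb : ¬ k x < k b := hx x (by simp)
      simp only [List.foldl_cons, if_neg hxb]
      exact ih (fun y hy => hx y (by simp [hy]))
  simpa [PySem.List.min?] using this bs h

-- ===== VERDICT =====
theorem q5c_highest_risk_band_py_spec : Claim_equal_q5c_highest_risk_band_py := by
  intro ps _
  unfold Spec_q5c_highest_risk_band_py
  unfold q5c_highest_risk_band_py q5c_highest_risk_band_py_alt
  rcases ps with _ | ⟨p, ps'⟩
  · simp
  · simp only [if_neg (by simp : ¬(p :: ps' = []))]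
    obtain ⟨b, bs, hcons⟩ : ∃ b bs, (p :: ps').map q5cNorm = b :: bs :=
      ⟨q5cNorm p, ps'.map q5cNorm, rfl⟩
    rw [hcons]
    obtain ⟨m, hm⟩ : ∃ m, PySem.List.min? (b :: bs) q5cKey = some m := by
      cases h : PySem.List.min? (b :: bs) q5cKey with
      | none => exact absurd ((PySem.List.min?_eq_none_iff _ _).mp h) (by simp)
      | some m => exact ⟨m, rfl⟩
    rw [hm]
    have hmem : m ∈ b :: bs := PySem.List.min?_mem hm
    have hmin : ∀ y ∈ b :: bs, q5cKey m ≤ q5cKey y := PySem.List.min?_isMin hm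
    have hkm := q5cKey_eq m
    by_cases hf : "fail" ∈ b :: bs
    · have h1 := hmin _ hf
      rw [show q5cKey "fail" = 0 from by decide] at h1
      split_ifs at hkm with e1 e2 e3 e4 <;> rw [hkm] at h1 <;>
        first
        | omega
        | (simp [q5cScan, hf, e1])
    · by_cases hbnd : "borderline" ∈ b :: bs
      · have h1 := hmin _ hbnd
        rw [show q5cKey "borderline" = 1 from by decide] at h1
        split_ifs at hkm with e1 e2 e3 e4 <;> rw [hkm] at h1 <;>
          first
          | omega
          | (subst e1; exact absurd hmem hf)
          | (simp [q5cScan, hf, hbnd, e2])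
      · by_cases hw : "watch" ∈ b :: bs
        · have h1 := hmin _ hw
          rw [show q5cKey "watch" = 2 from by decide] at h1
          split_ifs at hkm with e1 e2 e3 e4 <;> rw [hkm] at h1 <;>
            first
            | omega
            | (subst e1; exact absurd hmem hf)
            | (subst e2; exact absurd hmem hbnd)
            | (simp [q5cScan, hf, hbnd, hw, e3])
        · by_cases hs : "stable" ∈ b :: bs
          · have h1 := hmin _ hs
            rw [show q5cKey "stable" = 3 from by decide] at h1
            split_ifs at hkm with e1 e2 e3 e4 <;> rw [hkm] at h1 <;>
              first
              | omega
              | (subst e1; exact absurd hmem hf)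
              | (subst e2; exact absurd hmem hbnd)
              | (subst e3; exact absurd hmem hw)
              | (simp [q5cScan, hf, hbnd, hw, hs, e4])
          · -- no known band present: every key is 999, min? keeps the head
            have hall : ∀ x ∈ b :: bs, q5cKey x = 999 := by
              intro x hx
              have hk := q5cKey_eq x
              split_ifs at hk with e1 e2 e3 e4
              · exact absurd (e1 ▸ hx) hf
              · exact absurd (e2 ▸ hx) hbnd
              · exact absurd (e3 ▸ hx) hw
              · exact absurd (e4 ▸ hx) hs
              · exact hk
            have hhead := min?_cons_head q5cKey b bs (by
              intro x hx
              rw [hall x (by simp [hx]), hall b (by simp)]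
              omega)
            rw [hhead] at hm
            cases hm
            simp [q5cScan, hf, hbnd, hw, hs]
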